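-- pv_equiv track=rewrite | github.com/JulieCJWu/siWalk | src/create_more_features.py | frequency_of_seq_struc_triplet
-- ===== SOURCE A (Python) =====
-- def find_all_overlapping_matches(seq, substring):
--   """Return start indices of all overlapping occurrences of *substring* in *seq*."""
--   matches = []
--   start = 0
--   while start < len(seq):
--     start = seq.find(substring, start)
--     if start == -1:
--         break
--     matches.append(start)
--     start += 1
--   return matches
--
-- def frequency_of_seq_struc_triplet(seq, fold):
--   """Count occurrences of 32 sequence-structure triplet combinations.
--
--   Triplet keys combine one of {AAA, TTT, CCC, GGG} with one of eight structure
--   patterns at the same three positions (e.g., AAA((( or AAA...). Brackets ')'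
--   are normalized to '(' so only paired/unpaired distinction is used.
--   Returns a dict of 32 keys with occurrence counts.
--   """
--   d = {}
--   substrings = ['AAA', 'TTT', 'CCC', 'GGG']
--   substructs = ['(((', '((.', '(.(', '.((', '..(', '.(.', '(..', '...']
--   for substring in substrings:
--     for substruct in substructs:
--       k = substring + substruct
--       d[k] = 0
--
--   for substring in substrings:
--     matches = find_all_overlapping_matches(seq, substring)
--     for match in matches:
--       struc = fold[match:match+3].replace(")", "(")
--       k = substring + struc
--       if k in d.keys(): d[k] += 1
--   return d
-- ===== SOURCE B (Python) =====
-- def frequency_of_seq_struc_triplet(seq, fold):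
--   """Single positional sweep: check the triplet at each index once, instead of
--   running four overlapping find() scans over the sequence."""
--   trips = ['AAA', 'TTT', 'CCC', 'GGG']
--   strucs = ['(((', '((.', '(.(', '.((', '..(', '.(.', '(..', '...']
--   d = {t + s: 0 for t in trips for s in strucs}
--   for i in range(len(seq)):
--     tri = seq[i:i+3]
--     if tri in trips:
--       k = tri + fold[i:i+3].replace(")", "(")
--       if k in d:
--         d[k] += 1
--   return d
-- ===== Notes on version B (the rewrite author's own statement) =====
-- stated objective: idiomatic
-- what changed: Replaces the four overlapping str.find scans (one per triplet) plus per-match dict updates with a single positional sweep over range(len(seq)) that reads seq[i:i+3] once per index and builds the key directly.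
import Mathlib
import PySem

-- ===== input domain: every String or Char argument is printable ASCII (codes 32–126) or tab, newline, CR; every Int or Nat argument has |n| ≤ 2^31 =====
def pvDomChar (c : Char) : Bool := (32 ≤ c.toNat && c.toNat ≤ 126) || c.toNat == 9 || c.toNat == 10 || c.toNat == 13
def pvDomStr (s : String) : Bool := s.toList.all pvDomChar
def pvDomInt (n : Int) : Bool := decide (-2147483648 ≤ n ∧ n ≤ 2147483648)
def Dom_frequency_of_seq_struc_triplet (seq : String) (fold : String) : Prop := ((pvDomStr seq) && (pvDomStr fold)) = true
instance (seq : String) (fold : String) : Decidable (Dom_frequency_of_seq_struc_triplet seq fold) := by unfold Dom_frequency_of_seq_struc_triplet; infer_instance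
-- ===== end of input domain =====

-- B replaces A's four overlapping-find scans by one positional sweep over the sequence (objective: alternative/idiomatic; return value only, neither mutates its arguments).
-- Both ports work at the code-point (List Char) level via PySem.Chars, which is exact on the ASCII domain.

-- ===== PORT A =====
-- the 'while start < len(seq)' loop of find_all_overlapping_matches; fuel (length+1) only makes
-- the same computation total: start strictly increases each iteration, so fuel never runs out.
def pvFamGo (seqL subL : List Char) (fuel : Nat) (start : Int) : List Int :=
  match fuel with
  | 0 => []
  | fuel + 1 =>
    if start < (seqL.length : Int) then
      let start' := PySem.Chars.findFrom seqL subL start none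
      if start' = -1 then []
      else start' :: pvFamGo seqL subL fuel (start' + 1)
    else []

def find_all_overlapping_matches (seqL : List Char) (substring : List Char) : List Int :=
  pvFamGo seqL substring (seqL.length + 1) 0

def frequency_of_seq_struc_triplet (seq : String) (fold : String) : List (String × Int) :=
  let seqL := seq.toList
  let foldL := fold.toList
  let substrings : List (List Char) := [['A','A','A'], ['T','T','T'], ['C','C','C'], ['G','G','G']]
  let substructs : List (List Char) := [['(','(','('], ['(','(','.'], ['(','.','('], ['.','(','('], ['.','.','('], ['.','(','.'], ['(','.','.'], ['.','.','.']]
  let d : PySem.Dict String Int := substrings.foldl (fun d substring =>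
    substructs.foldl (fun d substruct => d.insert (String.ofList (substring ++ substruct)) 0) d) PySem.Dict.empty
  let d := substrings.foldl (fun d substring =>
    (find_all_overlapping_matches seqL substring).foldl (fun d m =>
      let struc := PySem.Chars.replace (PySem.Chars.slice foldL (some m) (some (m + 3))) [')'] ['(']
      let k := String.ofList (substring ++ struc)
      if d.contains k then d.modify k 0 (fun v => v + 1) else d) d) d
  d.items

-- ===== PORT B =====
def frequency_of_seq_struc_triplet_alt (seq : String) (fold : String) : List (String × Int) :=
  let seqL := seq.toList
  let foldL := fold.toList
  let trips : List (List Char) := [['A','A','A'], ['T','T','T'], ['C','C','C'], ['G','G','G']]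
  let strucs : List (List Char) := [['(','(','('], ['(','(','.'], ['(','.','('], ['.','(','('], ['.','.','('], ['.','(','.'], ['(','.','.'], ['.','.','.']]
  let d0 : PySem.Dict String Int :=
    (trips.flatMap (fun t => strucs.map (fun s => String.ofList (t ++ s)))).foldl (fun d key => d.insert key 0) PySem.Dict.empty
  let d := (PySem.List.pyRange 0 seqL.length 1).foldl (fun d i =>
    let tri := PySem.Chars.slice seqL (some i) (some (i + 3))
    if trips.contains tri then
      let k := String.ofList (tri ++ PySem.Chars.replace (PySem.Chars.slice foldL (some i) (some (i + 3))) [')'] ['('])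
      if d.contains k then d.modify k 0 (fun v => v + 1) else d
    else d) d0
  d.items

-- ===== PRECONDITION & SPEC =====
def Spec_frequency_of_seq_struc_triplet (seq : String) (fold : String) (out : List (String × Int)) : Prop := out = frequency_of_seq_struc_triplet_alt seq fold
instance (seq : String) (fold : String) (out : List (String × Int)) : Decidable (Spec_frequency_of_seq_struc_triplet seq fold out) := by unfold Spec_frequency_of_seq_struc_triplet; infer_instance

-- ===== CLAIM (what is proved, stated in full; the proofs are below) =====
def Claim_equal_frequency_of_seq_struc_triplet : Prop := ∀ (seq : String) (fold : String), Dom_frequency_of_seq_struc_triplet seq fold → Spec_frequency_of_seq_struc_triplet seq fold (frequency_of_seq_struc_triplet seq fold)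

-- ===== LEMMAS AND PROOFS =====

-- filter over range, splitting at the first index ≥ k satisfying p
lemma pvFilter_range_min (p : Nat → Bool) (n j k : Nat) (hj : j < n) (hk : k ≤ j)
    (hpj : p j = true) (hmin : ∀ i, k ≤ i → i < j → p i = false) :
    (List.range n).filter (fun i => decide (k ≤ i) && p i)
      = j :: (List.range n).filter (fun i => decide (j + 1 ≤ i) && p i) := by
  induction n with
  | zero => omega
  | succ n ih =>
    rw [List.range_succ, List.filter_append, List.filter_append]
    by_cases hn : j < n
    · rw [ih hn]
      have hkn : decide (k ≤ n) = true := by simp; omega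
      have hjn : decide (j + 1 ≤ n) = true := by simp; omega
      simp only [List.filter_cons, List.filter_nil, hkn, hjn, Bool.true_and]
      rw [List.cons_append]
    · have hj' : j = n := by omega
      subst hj'
      have h1 : (List.range j).filter (fun i => decide (k ≤ i) && p i) = [] := by
        rw [List.filter_eq_nil_iff]
        intro i hi
        simp only [List.mem_range] at hi
        by_cases hki : k ≤ i
        · simp [hmin i hki hi]
        · simp [hki]
      have h2 : (List.range j).filter (fun i => decide (j + 1 ≤ i) && p i) = [] := by
        rw [List.filter_eq_nil_iff]
        intro i hi
        simp only [List.mem_range] at hi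
        have : ¬ (j + 1 ≤ i) := by omega
        simp [this]
      have h3 : ([j].filter (fun i => decide (k ≤ i) && p i)) = [j] := by
        simp [hk, hpj]
      have h4 : ([j].filter (fun i => decide (j + 1 ≤ i) && p i)) = [] := by
        simp
      rw [h1, h2, h3, h4]
      rfl

lemma pvFam_spec (seqL subL : List Char) (hsub : subL ≠ []) :
    ∀ (fuel k : Nat), k ≤ seqL.length → seqL.length + 1 - k ≤ fuel →
    pvFamGo seqL subL fuel (k : Int)
      = ((List.range seqL.length).filter (fun i => decide (k ≤ i) && decide (subL <+: seqL.drop i))).map Int.ofNat := by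
  intro fuel
  induction fuel with
  | zero => intro k hk hf; omega
  | succ fuel ih =>
    intro k hk hf
    by_cases hlt : k < seqL.length
    · rw [pvFamGo, if_pos (by exact_mod_cast hlt)]
      by_cases hj : PySem.Chars.findFrom seqL subL (k : Int) none = -1
      · rw [if_pos hj]
        have hno : ¬ subL <:+: seqL.drop k := (PySem.Chars.findFrom_natCast_eq_neg_one_iff seqL subL k hk).mp hj
        symm
        rw [List.map_eq_nil_iff, List.filter_eq_nil_iff]
        intro i hi
        simp only [List.mem_range] at hi
        by_cases hki : k ≤ i
        · suffices h : ¬ subL <+: seqL.drop i by simp [h]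
          intro hpre
          apply hno
          rw [← PySem.Chars.isIn_iff_infix, ← PySem.Chars.exists_prefix_drop_iff_isIn]
          refine ⟨i - k, ?_⟩
          rw [List.drop_drop]
          have hik : k + (i - k) = i := by omega
          rwa [hik]
        · simp [hki]
      · rw [if_neg hj]
        obtain ⟨hge, hpre, hmin⟩ := PySem.Chars.findFrom_natCast_spec seqL subL k hk hj
        set j := PySem.Chars.findFrom seqL subL (k : Int) none with hjdef
        have hj0 : 0 ≤ j := le_trans (by exact_mod_cast Nat.zero_le k) hge
        have hjm : j = ((j.toNat : Nat) : Int) := (Int.toNat_of_nonneg hj0).symm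
        have hkm : k ≤ j.toNat := by omega
        have hmlen : j.toNat < seqL.length := by
          have hlen := hpre.length_le
          have : 0 < subL.length := List.length_pos_iff.mpr hsub
          rw [List.length_drop] at hlen
          omega
        have hrec : j + 1 = (((j.toNat + 1 : Nat)) : Int) := by omega
        rw [hrec, ih (j.toNat + 1) (by omega) (by omega)]
        rw [pvFilter_range_min (fun i => decide (subL <+: seqL.drop i)) seqL.length j.toNat k hmlen hkm
              (by simp [hpre]) (fun i h1 h2 => by simp [hmin i h1 h2])]
        rw [List.map_cons]
        congr 1
    · rw [pvFamGo, if_neg (by exact_mod_cast hlt)]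
      symm
      rw [List.map_eq_nil_iff, List.filter_eq_nil_iff]
      intro i hi
      simp only [List.mem_range] at hi
      have : ¬ k ≤ i := by omega
      simp [this]

lemma pvFam_eq (seqL subL : List Char) (hsub : subL ≠ []) :
    find_all_overlapping_matches seqL subL
      = ((List.range seqL.length).filter (fun i => decide (subL <+: seqL.drop i))).map Int.ofNat := by
  rw [find_all_overlapping_matches]
  have h0 : ((0 : Nat) : Int) = (0 : Int) := rfl
  rw [← h0, pvFam_spec seqL subL hsub (seqL.length + 1) 0 (Nat.zero_le _) (by omega)]
  congr 1

lemma pvKeysA {α : Type} (l : List α) (key : α → String) (d : PySem.Dict String Int) :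
    (l.foldl (fun d x => if d.contains (key x) then d.modify (key x) 0 (fun v => v + 1) else d) d).keys = d.keys := by
  induction l generalizing d with
  | nil => rfl
  | cons x l ih =>
    simp only [List.foldl_cons]
    rw [ih]
    by_cases hc : d.contains (key x)
    · rw [if_pos hc, PySem.Dict.keys_modify, PySem.Dict.keys_insert_of_contains]
      exact hc
    · rw [if_neg hc]

lemma pvGetDA {α : Type} (l : List α) (key : α → String) (d : PySem.Dict String Int) (k : String) :
    (l.foldl (fun d x => if d.contains (key x) then d.modify (key x) 0 (fun v => v + 1) else d) d).getD k 0
      = d.getD k 0 + (if d.contains k then ((l.map key).count k : Int) else 0) := by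
  induction l generalizing d with
  | nil => simp
  | cons x l ih =>
    simp only [List.foldl_cons, List.map_cons]
    rw [ih]
    have hkeys : (if d.contains (key x) then d.modify (key x) 0 (fun v => v + 1) else d).keys = d.keys := by
      have := pvKeysA [x] key d
      simpa using this
    have hck : (if d.contains (key x) then d.modify (key x) 0 (fun v => v + 1) else d).contains k = d.contains k := by
      rw [PySem.Dict.contains_eq_decide_mem_keys _ k, hkeys, ← PySem.Dict.contains_eq_decide_mem_keys]
    rw [hck]
    by_cases hx : d.contains (key x) = true
    · rw [if_pos hx, PySem.Dict.getD_modify]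
      by_cases hkx : k = key x
      · subst hkx
        rw [if_pos rfl, if_pos hx, if_pos hx, List.count_cons_self]
        push_cast
        ring
      · rw [if_neg hkx, List.count_cons_of_ne (fun h => hkx h.symm)]
    · rw [if_neg hx]
      by_cases hk : d.contains k = true
      · have hne : key x ≠ k := fun h => hx (h ▸ hk)
        rw [if_pos hk, if_pos hk, List.count_cons_of_ne hne]
      · simp [hk]

lemma pvKeysB {α : Type} (l : List α) (p : α → Bool) (key : α → String) (d : PySem.Dict String Int) :
    (l.foldl (fun d x => if p x then (if d.contains (key x) then d.modify (key x) 0 (fun v => v + 1) else d) else d) d).keys = d.keys := by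
  induction l generalizing d with
  | nil => rfl
  | cons x l ih =>
    simp only [List.foldl_cons]
    rw [ih]
    by_cases hp : p x = true
    · rw [if_pos hp]
      have := pvKeysA [x] key d
      simpa using this
    · rw [if_neg hp]

lemma pvGetDB {α : Type} (l : List α) (p : α → Bool) (key : α → String) (d : PySem.Dict String Int) (k : String) :
    (l.foldl (fun d x => if p x then (if d.contains (key x) then d.modify (key x) 0 (fun v => v + 1) else d) else d) d).getD k 0
      = d.getD k 0 + (if d.contains k then (((l.filter p).map key).count k : Int) else 0) := by
  induction l generalizing d with
  | nil => simp
  | cons x l ih =>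
    simp only [List.foldl_cons, List.filter_cons]
    by_cases hp : p x = true
    · simp only [if_pos hp, List.map_cons]
      rw [ih]
      have hstep := pvGetDA [x] key d k
      simp only [List.foldl_cons, List.foldl_nil, List.map_cons, List.map_nil] at hstep
      have hkeys : (if d.contains (key x) then d.modify (key x) 0 (fun v => v + 1) else d).keys = d.keys := by
        have := pvKeysA [x] key d
        simpa using this
      have hck : (if d.contains (key x) then d.modify (key x) 0 (fun v => v + 1) else d).contains k = d.contains k := by
        rw [PySem.Dict.contains_eq_decide_mem_keys _ k, hkeys, ← PySem.Dict.contains_eq_decide_mem_keys]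
      rw [hck, hstep]
      by_cases hk : d.contains k = true
      · simp only [if_pos hk, List.count_cons, List.count_nil]
        push_cast
        split_ifs <;> push_cast <;> ring
      · simp [hk]
    · rw [if_neg hp, if_neg hp]
      exact ih d

lemma pvItems_eq (d : PySem.Dict String Int) (h : d.keys.Nodup) :
    d.items = d.keys.map (fun k => (k, d.getD k 0)) := by
  have hk : d.keys = d.items.map Prod.fst := by simp [PySem.Dict.keys]
  rw [hk, List.map_map]
  conv_lhs => rw [← List.map_id d.items]
  apply List.map_congr_left
  intro p hp
  have : d.getD p.1 0 = p.2 := PySem.Dict.getD_of_mem_items d (by simpa using hp) h 0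
  simp [Function.comp, this]

lemma pvPyRange_eq (n : Nat) : PySem.List.pyRange 0 n 1 = (List.range n).map Int.ofNat := by
  rcases Nat.eq_zero_or_pos n with h | h
  · simp [PySem.List.pyRange, h]
  · simp [PySem.List.pyRange, h]


-- keys/value formula through A's outer loop over the four substrings
lemma pvKeysA2 {β α : Type} (S : List β) (ls : β → List α) (key : β → α → String) (d : PySem.Dict String Int) :
    (S.foldl (fun d s => (ls s).foldl (fun d x => if d.contains (key s x) then d.modify (key s x) 0 (fun v => v + 1) else d) d) d).keys = d.keys := by
  induction S generalizing d with
  | nil => rfl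
  | cons s S ih =>
    simp only [List.foldl_cons]
    rw [ih, pvKeysA]

lemma pvGetDA2 {β α : Type} (S : List β) (ls : β → List α) (key : β → α → String) (d : PySem.Dict String Int) (k : String) :
    (S.foldl (fun d s => (ls s).foldl (fun d x => if d.contains (key s x) then d.modify (key s x) 0 (fun v => v + 1) else d) d) d).getD k 0
      = d.getD k 0 + (if d.contains k then ((S.flatMap (fun s => (ls s).map (key s))).count k : Int) else 0) := by
  induction S generalizing d with
  | nil => simp
  | cons s S ih =>
    simp only [List.foldl_cons, List.flatMap_cons]
    rw [ih, pvGetDA]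
    have hkeys := pvKeysA (ls s) (key s) d
    have hck : ((ls s).foldl (fun d x => if d.contains (key s x) then d.modify (key s x) 0 (fun v => v + 1) else d) d).contains k = d.contains k := by
      rw [PySem.Dict.contains_eq_decide_mem_keys _ k, hkeys, ← PySem.Dict.contains_eq_decide_mem_keys]
    rw [hck]
    by_cases hk : d.contains k = true
    · simp only [if_pos hk, List.count_append]
      push_cast
      ring
    · simp [hk]

-- proof-only abbreviations for the terms occurring in the two ports
def pvTrips : List (List Char) := [['A','A','A'], ['T','T','T'], ['C','C','C'], ['G','G','G']]
def pvStrucs : List (List Char) := [['(','(','('], ['(','(','.'], ['(','.','('], ['.','(','('], ['.','.','('], ['.','(','.'], ['(','.','.'], ['.','.','.']]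
def pvBase1 : PySem.Dict String Int := pvTrips.foldl (fun d s => pvStrucs.foldl (fun d p => d.insert (String.ofList (s ++ p)) 0) d) PySem.Dict.empty
def pvBase2 : PySem.Dict String Int := (pvTrips.flatMap (fun t => pvStrucs.map (fun s => String.ofList (t ++ s)))).foldl (fun d key => d.insert key 0) PySem.Dict.empty
def pvKeyA (foldL : List Char) (s : List Char) (m : Int) : String :=
  String.ofList (s ++ PySem.Chars.replace (PySem.Chars.slice foldL (some m) (some (m + 3))) [')'] ['('])
def pvKeyB (seqL foldL : List Char) (i : Int) : String :=
  String.ofList (PySem.Chars.slice seqL (some i) (some (i + 3)) ++ PySem.Chars.replace (PySem.Chars.slice foldL (some i) (some (i + 3))) [')'] ['('])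
def pvP (seqL : List Char) (i : Int) : Bool := pvTrips.contains (PySem.Chars.slice seqL (some i) (some (i + 3)))

-- per-position case split: each position is counted by exactly one of A's four scans
lemma pvSum (l : List Nat) (T St : Nat → List Char) (k : String) :
    (l.countP (fun i => String.ofList (['A','A','A'] ++ St i) == k && decide ((['A','A','A'] : List Char) = T i))
      + (l.countP (fun i => String.ofList (['T','T','T'] ++ St i) == k && decide ((['T','T','T'] : List Char) = T i))
        + (l.countP (fun i => String.ofList (['C','C','C'] ++ St i) == k && decide ((['C','C','C'] : List Char) = T i))
          + l.countP (fun i => String.ofList (['G','G','G'] ++ St i) == k && decide ((['G','G','G'] : List Char) = T i)))))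
    = l.countP (fun i => String.ofList (T i ++ St i) == k && pvTrips.contains (T i)) := by
  induction l with
  | nil => rfl
  | cons i l ih =>
    simp only [List.countP_cons]
    by_cases hA : (['A','A','A'] : List Char) = T i
    · have dk : (String.ofList (T i ++ St i) == k) = (String.ofList (['A','A','A'] ++ St i) == k) := by rw [← hA]
      rw [dk]
      simp only [← hA,
        show pvTrips.contains (['A','A','A'] : List Char) = true from by decide,
        show ((['T','T','T'] : List Char) = ['A','A','A']) = False from by simp,
        show ((['C','C','C'] : List Char) = ['A','A','A']) = False from by simp,
        show ((['G','G','G'] : List Char) = ['A','A','A']) = False from by simp,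
        decide_true, decide_false, Bool.and_true, Bool.and_false, Bool.false_eq_true, if_false]
      omega
    · by_cases hT : (['T','T','T'] : List Char) = T i
      · have dk : (String.ofList (T i ++ St i) == k) = (String.ofList (['T','T','T'] ++ St i) == k) := by rw [← hT]
        rw [dk]
        simp only [← hT,
          show pvTrips.contains (['T','T','T'] : List Char) = true from by decide,
          show ((['A','A','A'] : List Char) = ['T','T','T']) = False from by simp,
          show ((['C','C','C'] : List Char) = ['T','T','T']) = False from by simp,
          show ((['G','G','G'] : List Char) = ['T','T','T']) = False from by simp,
          decide_true, decide_false, Bool.and_true, Bool.and_false, Bool.false_eq_true, if_false]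
        omega
      · by_cases hC : (['C','C','C'] : List Char) = T i
        · have dk : (String.ofList (T i ++ St i) == k) = (String.ofList (['C','C','C'] ++ St i) == k) := by rw [← hC]
          rw [dk]
          simp only [← hC,
            show pvTrips.contains (['C','C','C'] : List Char) = true from by decide,
            show ((['A','A','A'] : List Char) = ['C','C','C']) = False from by simp,
            show ((['T','T','T'] : List Char) = ['C','C','C']) = False from by simp,
            show ((['G','G','G'] : List Char) = ['C','C','C']) = False from by simp,
            decide_true, decide_false, Bool.and_true, Bool.and_false, Bool.false_eq_true, if_false]
          omega
        · by_cases hG : (['G','G','G'] : List Char) = T i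
          · have dk : (String.ofList (T i ++ St i) == k) = (String.ofList (['G','G','G'] ++ St i) == k) := by rw [← hG]
            rw [dk]
            simp only [← hG,
              show pvTrips.contains (['G','G','G'] : List Char) = true from by decide,
              show ((['A','A','A'] : List Char) = ['G','G','G']) = False from by simp,
              show ((['T','T','T'] : List Char) = ['G','G','G']) = False from by simp,
              show ((['C','C','C'] : List Char) = ['G','G','G']) = False from by simp,
              decide_true, decide_false, Bool.and_true, Bool.and_false, Bool.false_eq_true, if_false]
            omega
          · have dA : decide ((['A','A','A'] : List Char) = T i) = false := by simp [hA]
            have dT : decide ((['T','T','T'] : List Char) = T i) = false := by simp [hT]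
            have dC : decide ((['C','C','C'] : List Char) = T i) = false := by simp [hC]
            have dG : decide ((['G','G','G'] : List Char) = T i) = false := by simp [hG]
            have dc : pvTrips.contains (T i) = false := by
              simp only [pvTrips, List.contains_eq_mem, List.mem_cons, List.not_mem_nil, or_false,
                decide_eq_false_iff_not]
              push Not
              exact ⟨fun h => hA h.symm, fun h => hT h.symm, fun h => hC h.symm, fun h => hG h.symm⟩
            simp only [dA, dT, dC, dG, dc, Bool.and_false, Bool.false_eq_true, if_false]
            omega


-- the central count equality: A's per-substring scans and B's single sweep count every key alike
lemma pvCount (seqL foldL : List Char) (k : String) :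
    (pvTrips.flatMap (fun s => (find_all_overlapping_matches seqL s).map (pvKeyA foldL s))).count k
      = (((PySem.List.pyRange 0 seqL.length 1).filter (pvP seqL)).map (pvKeyB seqL foldL)).count k := by
  have hsl : ∀ (L : List Char) (i : Nat), PySem.Chars.slice L (some (i : Int)) (some ((i : Int) + 3)) = (L.drop i).take 3 := by
    intro L i
    have h := PySem.List.slice_natCast_add L i 3
    push_cast at h
    simpa using h
  rw [pvPyRange_eq]
  simp only [pvTrips, List.flatMap_cons, List.flatMap_nil, List.append_nil, List.count_append]
  rw [pvFam_eq seqL ['A','A','A'] (by decide), pvFam_eq seqL ['T','T','T'] (by decide),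
      pvFam_eq seqL ['C','C','C'] (by decide), pvFam_eq seqL ['G','G','G'] (by decide)]
  simp only [List.count_eq_countP, List.countP_map, List.countP_filter, List.filter_map, Function.comp]
  have hkeyA : ∀ (s : List Char) (i : Nat), pvKeyA foldL s (Int.ofNat i)
      = String.ofList (s ++ PySem.Chars.replace ((foldL.drop i).take 3) [')'] ['(']) := by
    intro s i
    simp only [pvKeyA, Int.ofNat_eq_natCast, hsl]
  have hkeyB : ∀ i : Nat, pvKeyB seqL foldL (Int.ofNat i)
      = String.ofList ((seqL.drop i).take 3 ++ PySem.Chars.replace ((foldL.drop i).take 3) [')'] ['(']) := by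
    intro i
    simp only [pvKeyB, Int.ofNat_eq_natCast, hsl]
  have hp : ∀ i : Nat, pvP seqL (Int.ofNat i) = pvTrips.contains ((seqL.drop i).take 3) := by
    intro i
    simp only [pvP, Int.ofNat_eq_natCast, hsl]
  simp only [hkeyA, hkeyB, hp, List.prefix_iff_eq_take, List.length_cons, List.length_nil]
  exact pvSum (List.range seqL.length) (fun i => (seqL.drop i).take 3)
    (fun i => PySem.Chars.replace ((foldL.drop i).take 3) [')'] ['(']) k

lemma pvMain (seqL foldL : List Char) :
    (pvTrips.foldl (fun d s =>
        (find_all_overlapping_matches seqL s).foldl (fun d m =>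
          if d.contains (pvKeyA foldL s m) then d.modify (pvKeyA foldL s m) 0 (fun v => v + 1) else d) d) pvBase1).items
    = ((PySem.List.pyRange 0 seqL.length 1).foldl (fun d i =>
        if pvP seqL i then
          (if d.contains (pvKeyB seqL foldL i) then d.modify (pvKeyB seqL foldL i) 0 (fun v => v + 1) else d)
        else d) pvBase2).items := by
  have hb12 : pvBase1 = pvBase2 := by decide
  have hkA := pvKeysA2 pvTrips (fun s => find_all_overlapping_matches seqL s) (pvKeyA foldL) pvBase1
  have hkB := pvKeysB (PySem.List.pyRange 0 seqL.length 1) (pvP seqL) (pvKeyB seqL foldL) pvBase2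
  have hnodup : pvBase2.keys.Nodup := by decide
  rw [pvItems_eq _ (by rw [hkA, hb12]; exact hnodup), pvItems_eq _ (by rw [hkB]; exact hnodup), hkA, hkB, hb12]
  apply List.map_congr_left
  intro k _
  rw [pvGetDA2, pvGetDB]
  by_cases hc : pvBase2.contains k = true
  · simp only [if_pos hc]
    have := pvCount seqL foldL k
    congr 2
    exact_mod_cast this
  · simp [hc]

-- ===== VERDICT (by name: the statement is the Claim_ definition above) =====
theorem frequency_of_seq_struc_triplet_spec : Claim_equal_frequency_of_seq_struc_triplet := by
  intro seq fold _
  unfold Spec_frequency_of_seq_struc_triplet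
  show frequency_of_seq_struc_triplet seq fold = frequency_of_seq_struc_triplet_alt seq fold
  simp only [frequency_of_seq_struc_triplet, frequency_of_seq_struc_triplet_alt]
  exact pvMain seq.toList fold.toList
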